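-- pv_equiv track=rewrite | github.com/ChinemeremChigbo/CodingProblems | Google/Kick Start/2021/Round H/Q2.py | func
-- ===== SOURCE A (Python) =====
-- def func(s,f):
--     R = "".join(["1" if i in "ROPA" else "0" for i in f])
--     Y = "".join(["1" if i in "YOGA" else "0" for i in f])
--     B = "".join(["1" if i in "BPGA" else "0" for i in f])
--     def cont(arr):
--         res = arr.count("10")
--         return res if arr[-1] == "0" else res + 1
--     return sum([cont(R),cont(Y),cont(B)])
-- ===== SOURCE B (Python) =====
-- def func(s, f):
--     total = 0
--     for colors in ("ROPA", "YOGA", "BPGA"):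
--         masked = "".join(c if c in colors else " " for c in f)
--         total += len(masked.split())
--     return total
-- ===== Notes on version B (the rewrite author's own statement) =====
-- stated objective: alternative
-- what changed: B replaces A's 0/1 bit-strings with '10'-substring counting plus a last-character check by masking non-set characters to spaces and counting whitespace-split tokens, so each color's run count is the token count of str.split() with no edge/endpoint logic at all.
import Mathlib
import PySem

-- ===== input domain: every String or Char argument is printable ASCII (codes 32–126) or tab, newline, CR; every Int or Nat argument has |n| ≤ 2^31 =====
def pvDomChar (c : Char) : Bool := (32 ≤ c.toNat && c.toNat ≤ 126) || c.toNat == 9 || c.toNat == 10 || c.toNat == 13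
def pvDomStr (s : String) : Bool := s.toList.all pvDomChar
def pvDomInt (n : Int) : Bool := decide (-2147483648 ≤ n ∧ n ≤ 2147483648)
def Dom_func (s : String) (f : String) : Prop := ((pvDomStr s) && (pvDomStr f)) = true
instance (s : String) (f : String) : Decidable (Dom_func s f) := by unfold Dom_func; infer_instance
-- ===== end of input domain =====

-- B replaces A's bit-strings + "10"-substring counting by masking non-set characters to spaces
-- and counting the tokens of str.split() per color set (objective: alternative mechanism).

-- ===== PORT A =====
-- cont(arr): count of "10" plus 1 unless the last bit is '0' (arr[-1] raises on empty arr → pyGet? = none, excluded by Pre_)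
def funcCont (arr : List Char) : Int :=
  let res : Int := (PySem.Chars.count arr ['1', '0'] : Int)
  if PySem.List.pyGet? arr (-1) = some '0' then res else res + 1

def func (s : String) (f : String) : Int :=
  let R := PySem.Chars.join [] (f.toList.map (fun i => if PySem.Chars.isIn [i] "ROPA".toList then ['1'] else ['0']))
  let Y := PySem.Chars.join [] (f.toList.map (fun i => if PySem.Chars.isIn [i] "YOGA".toList then ['1'] else ['0']))
  let B := PySem.Chars.join [] (f.toList.map (fun i => if PySem.Chars.isIn [i] "BPGA".toList then ['1'] else ['0']))
  [funcCont R, funcCont Y, funcCont B].sum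

-- ===== PORT B =====
-- masked = "".join(c if c in colors else " " for c in f); total += len(masked.split())
def func_alt (s : String) (f : String) : Int :=
  ["ROPA".toList, "YOGA".toList, "BPGA".toList].foldl
    (fun total colors =>
      total + ((PySem.Chars.split₀
        (PySem.Chars.join [] (f.toList.map (fun c => if PySem.Chars.isIn [c] colors then [c] else [' '])))).length : Int))
    0

-- ===== PRECONDITION & SPEC =====
-- Pre_ excludes only the empty fence string f, on which A raises IndexError (arr[-1]).
def Pre_func (s : String) (f : String) : Prop := f.toList ≠ []
instance (s : String) (f : String) : Decidable (Pre_func s f) := by unfold Pre_func; infer_instance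
def pvWitness_func : String × String := ("", "RBYGAOP")

def Spec_func (s : String) (f : String) (out : Int) : Prop := out = func_alt s f
instance (s : String) (f : String) (out : Int) : Decidable (Spec_func s f out) := by unfold Spec_func; infer_instance

-- ===== CLAIM (what is proved, stated in full; the proofs are below) =====
def Claim_equal_func : Prop := ∀ (s : String) (f : String), Dom_func s f → Pre_func s f → Spec_func s f (func s f)

-- ===== LEMMAS AND PROOFS =====

-- bit written for character c by A's comprehension, as a single Char
def pvBit (p : Char → Bool) (c : Char) : Char := if p c then '1' else '0'
-- character written for c by B's masking
def pvMask (p : Char → Bool) (c : Char) : Char := if p c then c else ' '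

-- tokens the whitespace tokenizer still produces from cs, given whether a token is currently open
def pvGo (p : Char → Bool) (inRun : Bool) : List Char → Nat
  | [] => if inRun then 1 else 0
  | c :: t => if p c then pvGo p true t else (if inRun then 1 else 0) + pvGo p false t

-- the number of runs read off A's bit string: occurrences of "10" (counted over the ORIGINAL characters)
def pvRuns (p : Char → Bool) : List Char → Nat
  | a :: b :: t => if p a && !p b then pvRuns p t + 1 else pvRuns p (b :: t)
  | _ => 0

theorem pvJoin_bits (p : Char → Bool) (cs : List Char) :
    PySem.Chars.join [] (cs.map (fun c => if p c then ['1'] else ['0'])) = cs.map (pvBit p) := by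
  have h : (fun c => if p c then ['1'] else ['0']) = (fun c => [c]) ∘ pvBit p := by
    funext c; by_cases hc : p c <;> simp [pvBit, hc]
  rw [h, ← List.map_map, PySem.Chars.join_nil_singletons]

theorem pvJoin_mask (p : Char → Bool) (cs : List Char) :
    PySem.Chars.join [] (cs.map (fun c => if p c then [c] else [' '])) = cs.map (pvMask p) := by
  have h : (fun c => if p c then [c] else [' ']) = (fun c => [c]) ∘ pvMask p := by
    funext c; by_cases hc : p c <;> simp [pvMask, hc]
  rw [h, ← List.map_map, PySem.Chars.join_nil_singletons]

theorem pvGo_nil (sub : List Char) (fuel : Nat) (acc : Nat) :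
    PySem.Chars.count.go sub fuel [] acc = acc := by
  cases fuel <;> rfl

theorem pvCount_go_eq (p : Char → Bool) :
    ∀ (fuel : Nat) (cs : List Char) (acc : Nat), cs.length ≤ fuel →
      PySem.Chars.count.go ['1', '0'] fuel (cs.map (pvBit p)) acc = acc + pvRuns p cs := by
  intro fuel
  induction fuel with
  | zero => intro cs acc h; have : cs = [] := by cases cs <;> simp_all
            subst this; simp [PySem.Chars.count.go, pvRuns]
  | succ n ih =>
    intro cs acc h
    match cs with
    | [] => simp [PySem.Chars.count.go, pvRuns]
    | [a] =>
      have hpre : List.isPrefixOf ['1', '0'] [pvBit p a] = false := by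
        by_cases hp : p a <;> simp [pvBit, hp, List.isPrefixOf]
      simp only [List.map_cons, List.map_nil, PySem.Chars.count.go, hpre]
      simp [pvGo_nil, pvRuns]
    | a :: b :: t =>
      have hlen : t.length + 2 ≤ n + 1 := by simpa using h
      by_cases hm : p a = true ∧ p b = false
      · have hpre : List.isPrefixOf ['1', '0'] (pvBit p a :: pvBit p b :: t.map (pvBit p)) = true := by
          simp [pvBit, hm.1, hm.2, List.isPrefixOf]
        simp only [List.map_cons, PySem.Chars.count.go, hpre, if_true]
        have hd : List.drop (['1','0'] : List Char).length
            (pvBit p a :: pvBit p b :: t.map (pvBit p)) = t.map (pvBit p) := by simp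
        rw [hd, ih t (acc + 1) (by omega)]
        simp [pvRuns, hm.1, hm.2]; omega
      · have hpre : List.isPrefixOf ['1', '0'] (pvBit p a :: pvBit p b :: t.map (pvBit p)) = false := by
          by_cases h1 : p a
          · have h2 : p b = true := by
              by_contra hb
              exact hm ⟨h1, by simpa using hb⟩
            simp [pvBit, h1, h2, List.isPrefixOf]
          · simp [pvBit, h1, List.isPrefixOf]
        simp only [List.map_cons, PySem.Chars.count.go, hpre]
        have hbt : (pvBit p b :: t.map (pvBit p)) = (b :: t).map (pvBit p) := by simp
        rw [if_neg (by simp), hbt, ih (b :: t) acc (by simp; omega)]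
        have : pvRuns p (a :: b :: t) = pvRuns p (b :: t) := by
          simp only [pvRuns]
          rw [if_neg]; intro hc; exact hm ⟨by simpa using (Bool.and_elim_left hc), by simpa using (Bool.and_elim_right hc)⟩
        rw [this]

theorem pvCount_eq (p : Char → Bool) (cs : List Char) :
    PySem.Chars.count (cs.map (pvBit p)) ['1', '0'] = pvRuns p cs := by
  simp [PySem.Chars.count]
  rw [pvCount_go_eq p _ cs 0 (by simp)]
  omega

theorem pvRuns_cons_of_not (p : Char → Bool) (b : Char) (u : List Char) (h : p b = false) :
    pvRuns p (b :: u) = pvRuns p u := by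
  cases u with
  | nil => simp [pvRuns]
  | cons c u' => simp [pvRuns, h]

-- A's count of "10" plus its last-bit term equals the tokenizer count pvGo
theorem pvRuns_to_go (p : Char → Bool) :
    ∀ (t : List Char) (a : Char),
      (pvRuns p (a :: t) : Int) + (if Option.map (pvBit p) (a :: t).getLast? = some '0' then 0 else 1)
        = (pvGo p (p a) t : Int) := by
  intro t
  induction t with
  | nil =>
    intro a
    by_cases hp : p a <;> simp [pvRuns, pvBit, pvGo, hp]
  | cons b t' ih =>
    intro a
    have hlast : (a :: b :: t').getLast? = (b :: t').getLast? := by simp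
    rw [hlast]
    by_cases h2 : p b
    · have hr : pvRuns p (a :: b :: t') = pvRuns p (b :: t') := by
        simp [pvRuns, h2]
      rw [hr]
      have := ih b
      rw [h2] at this
      simp only [pvGo, h2, if_true]
      exact this
    · have hb : p b = false := by simpa using h2
      have hr2 : pvRuns p (b :: t') = pvRuns p t' := pvRuns_cons_of_not p b t' hb
      have := ih b
      rw [hb, hr2] at this
      by_cases h1 : p a
      · have hr : pvRuns p (a :: b :: t') = pvRuns p t' + 1 := by
          simp [pvRuns, h1, hb]
        rw [hr]
        simp only [pvGo, hb, h1, if_true, if_false, Bool.false_eq_true]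
        push_cast
        omega
      · have hr : pvRuns p (a :: b :: t') = pvRuns p (b :: t') := by
          simp [pvRuns, h1]
        rw [hr, hr2]
        have h1' : p a = false := by simpa using h1
        simp only [pvGo, hb, h1', if_false, Bool.false_eq_true]
        push_cast at this ⊢
        omega

-- the whitespace tokenizer over the masked string counts exactly pvGo
theorem pvSplit_go (p : Char → Bool) (hp : ∀ c, p c = true → PySem.Chars.isspace c = false) :
    ∀ (cs : List Char) (cur : List Char) (acc : List (List Char)),
      (PySem.Chars.split₀.go (cs.map (pvMask p)) cur acc).length
        = acc.length + pvGo p (!cur.isEmpty) cs := by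
  intro cs
  induction cs with
  | nil =>
    intro cur acc
    by_cases hc : cur.isEmpty <;> simp [PySem.Chars.split₀.go, pvGo, hc]
  | cons c t ih =>
    intro cur acc
    by_cases hc : p c
    · have hm : pvMask p c = c := by simp [pvMask, hc]
      have hs : PySem.Chars.isspace c = false := hp c hc
      simp only [List.map_cons, hm, PySem.Chars.split₀.go, hs, Bool.false_eq_true, if_false]
      rw [ih (c :: cur) acc]
      simp [pvGo, hc]
    · have hc' : p c = false := by simpa using hc
      have hm : pvMask p c = ' ' := by simp [pvMask, hc']
      have hs : PySem.Chars.isspace ' ' = true := by decide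
      simp only [List.map_cons, hm, PySem.Chars.split₀.go, hs, if_true]
      by_cases hcur : cur.isEmpty
      · rw [if_pos hcur, ih [] acc]
        simp [pvGo, hc', hcur]
      · rw [if_neg hcur, ih [] (cur.reverse :: acc)]
        simp only [List.length_cons, List.isEmpty_nil, Bool.not_true, Bool.not_false]
        have : (!cur.isEmpty) = true := by simpa using hcur
        simp [pvGo, hc', this]
        omega

-- per color set: A's cont of the joined bit-string = B's token count of the masked string
theorem pvColor_eq (colors : List Char) (hcs : ∀ c ∈ colors, PySem.Chars.isspace c = false)
    (a : Char) (t : List Char) :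
    funcCont (PySem.Chars.join [] ((a :: t).map (fun i => if PySem.Chars.isIn [i] colors then ['1'] else ['0'])))
      = ((PySem.Chars.split₀
            (PySem.Chars.join [] ((a :: t).map (fun c => if PySem.Chars.isIn [c] colors then [c] else [' '])))).length : Int) := by
  have hp : ∀ c, PySem.Chars.isIn [c] colors = true → PySem.Chars.isspace c = false := by
    intro c h
    have hinf : [c] <:+: colors := (PySem.Chars.isIn_iff_infix _ _).mp h
    exact hcs c (hinf.subset (List.mem_singleton_self c))
  set p : Char → Bool := fun c => PySem.Chars.isIn [c] colors with hpdef
  rw [pvJoin_bits p, pvJoin_mask p]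
  unfold funcCont
  rw [PySem.List.pyGet?_neg_one, List.getLast?_map]
  rw [pvCount_eq p (a :: t)]
  have hsplit : PySem.Chars.split₀ ((a :: t).map (pvMask p)) = PySem.Chars.split₀.go ((a :: t).map (pvMask p)) [] [] := rfl
  rw [hsplit, pvSplit_go p hp (a :: t) [] []]
  simp only [List.length_nil, Nat.zero_add]
  have hgo : pvGo p (!([] : List Char).isEmpty) (a :: t) = pvGo p (p a) t := by
    by_cases ha : p a <;> simp [pvGo, ha]
  rw [hgo]
  have hm := pvRuns_to_go p t a
  by_cases hl : Option.map (pvBit p) (a :: t).getLast? = some '0'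
  · rw [if_pos hl]; rw [if_pos hl] at hm; omega
  · rw [if_neg hl]; rw [if_neg hl] at hm; omega

theorem pvNoSpaceROPA : ∀ c ∈ "ROPA".toList, PySem.Chars.isspace c = false := by
  intro c hc; fin_cases hc <;> rfl

theorem pvNoSpaceYOGA : ∀ c ∈ "YOGA".toList, PySem.Chars.isspace c = false := by
  intro c hc; fin_cases hc <;> rfl

theorem pvNoSpaceBPGA : ∀ c ∈ "BPGA".toList, PySem.Chars.isspace c = false := by
  intro c hc; fin_cases hc <;> rfl

-- ===== VERDICT (by name: the statement is the Claim_ definition above) =====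
theorem func_spec : Claim_equal_func := by
  intro s f _ hpre
  unfold Spec_func func func_alt
  obtain ⟨a, t, hft⟩ : ∃ a t, f.toList = a :: t := by
    cases h : f.toList with
    | nil => exact absurd h hpre
    | cons a t => exact ⟨a, t, rfl⟩
  simp only [hft]
  rw [pvColor_eq "ROPA".toList pvNoSpaceROPA a t,
      pvColor_eq "YOGA".toList pvNoSpaceYOGA a t,
      pvColor_eq "BPGA".toList pvNoSpaceBPGA a t]
  simp [List.foldl]
  ring
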